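-- pv_equiv track=rewrite | github.com/mssdfg0708/Algorithm | Programmers/[1차] 셔틀버스.py | target_safe
-- ===== SOURCE A (Python) =====
-- from collections import deque
--
-- def target_safe(new_timetable, bus_time, m):
--     wait_table = deque()
--     time_table = deque()
--     for time in new_timetable:
--         time_table.append(time)
--     bus_table = deque()
--     for time in bus_time:
--         bus_table.append(time)
--
--     while bus_table:
--         next_bus = bus_table.popleft()
--         crew_count = 0
--         while time_table and time_table[0][0] <= next_bus:
--             target = time_table.popleft()
--             wait_table.append(target)
--         while crew_count < m and wait_table:
--             crew_count += 1
--             crew = wait_table.popleft()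
--             if crew[1]:
--                 return True
--
--     return False
-- ===== SOURCE B (Python) =====
-- def target_safe(new_timetable, bus_time, m):
--     # Phase 1: pure counting — i = arrivals moved past, j = crews boarded.
--     n = len(new_timetable)
--     cap = max(m, 0)
--     i = j = 0
--     for bus in bus_time:
--         while i < n and new_timetable[i][0] <= bus:
--             i += 1
--         j = min(i, j + cap)
--     # Phase 2: the boarded crews are exactly the first j entries.
--     return any(flag for _, flag in new_timetable[:j])
-- ===== Notes on version B (the rewrite author's own statement) =====
-- stated objective: simpler
-- what changed: Replaces the three-deque simulation (separate drain-into-wait-queue and board-up-to-m loops, early return on a flagged crew) by a two-phase counting algorithm: one pass over bus_time maintaining only two integer counters (arrivals passed, crews boarded), then a single any() over the boarded prefix of the timetable.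
import Mathlib
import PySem

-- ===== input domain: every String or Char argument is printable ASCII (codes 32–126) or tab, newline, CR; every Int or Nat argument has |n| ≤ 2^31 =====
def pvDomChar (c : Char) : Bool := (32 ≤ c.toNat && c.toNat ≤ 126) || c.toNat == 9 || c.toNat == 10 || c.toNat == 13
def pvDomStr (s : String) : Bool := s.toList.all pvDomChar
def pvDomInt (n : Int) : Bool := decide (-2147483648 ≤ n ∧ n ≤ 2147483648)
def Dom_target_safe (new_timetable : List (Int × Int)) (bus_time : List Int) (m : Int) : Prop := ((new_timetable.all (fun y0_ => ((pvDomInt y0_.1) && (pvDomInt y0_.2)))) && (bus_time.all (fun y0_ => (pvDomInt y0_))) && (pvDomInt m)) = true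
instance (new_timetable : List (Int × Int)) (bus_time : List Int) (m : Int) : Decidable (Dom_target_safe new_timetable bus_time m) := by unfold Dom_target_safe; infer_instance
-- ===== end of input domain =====

-- B replaces A's three-deque simulation by two counters plus one any() over a prefix (objective: simpler).

-- ===== PORT A =====
-- inner drain loop: while time_table and time_table[0][0] <= next_bus: move head to wait_table
def drainA (time_table wait_table : List (Int × Int)) (next_bus : Int) :
    List (Int × Int) × List (Int × Int) :=
  match time_table with
  | [] => ([], wait_table)
  | t :: ts =>
      if t.1 ≤ next_bus then drainA ts (wait_table ++ [t]) next_bus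
      else (t :: ts, wait_table)

-- inner board loop: while crew_count < m and wait_table: pop; truthy flag => True
def boardA (wait_table : List (Int × Int)) (crew_count m : Int) :
    Bool × List (Int × Int) :=
  if crew_count < m then
    match wait_table with
    | [] => (false, [])
    | crew :: rest =>
        if crew.2 ≠ 0 then (true, rest) else boardA rest (crew_count + 1) m
  else (false, wait_table)

-- outer loop: while bus_table
def tsLoopA (time_table wait_table : List (Int × Int)) (bus_table : List Int) (m : Int) : Bool :=
  match bus_table with
  | [] => false
  | next_bus :: rest =>
      if (boardA (drainA time_table wait_table next_bus).2 0 m).1 then true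
      else tsLoopA (drainA time_table wait_table next_bus).1
        (boardA (drainA time_table wait_table next_bus).2 0 m).2 rest m

def target_safe (new_timetable : List (Int × Int)) (bus_time : List Int) (m : Int) : Bool :=
  tsLoopA new_timetable [] bus_time m

-- ===== PORT B =====
-- while i < n and new_timetable[i][0] <= bus: i += 1
def advanceB (nt : List (Int × Int)) (i : Nat) (bus : Int) : Nat :=
  match h : nt[i]? with
  | some t => if t.1 ≤ bus then advanceB nt (i + 1) bus else i
  | none => i
termination_by nt.length - i
decreasing_by
  obtain ⟨hlt, -⟩ := List.getElem?_eq_some_iff.mp h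
  omega

-- body of the for-loop over bus_time: update (i, j)
def stepB (nt : List (Int × Int)) (cap : Nat) (s : Nat × Nat) (bus : Int) : Nat × Nat :=
  (advanceB nt s.1 bus, min (advanceB nt s.1 bus) (s.2 + cap))

def target_safe_alt (new_timetable : List (Int × Int)) (bus_time : List Int) (m : Int) : Bool :=
  (new_timetable.take (bus_time.foldl (stepB new_timetable (max m 0).toNat) (0, 0)).2).any
    (fun t => t.2 != 0)

-- ===== PRECONDITION & SPEC =====
def Spec_target_safe (new_timetable : List (Int × Int)) (bus_time : List Int) (m : Int) (out : Bool) : Prop := out = target_safe_alt new_timetable bus_time m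
instance (new_timetable : List (Int × Int)) (bus_time : List Int) (m : Int) (out : Bool) : Decidable (Spec_target_safe new_timetable bus_time m out) := by unfold Spec_target_safe; infer_instance

-- ===== CLAIM (what is proved, stated in full; the proofs are below) =====
def Claim_equal_target_safe : Prop := ∀ (new_timetable : List (Int × Int)) (bus_time : List Int) (m : Int), Dom_target_safe new_timetable bus_time m → Spec_target_safe new_timetable bus_time m (target_safe new_timetable bus_time m)

-- ===== LEMMAS AND PROOFS =====

-- number of elements A's drain loop removes from the front of time_table
def kf : List (Int × Int) → Int → Nat
  | [], _ => 0
  | t :: ts, b => if t.1 ≤ b then kf ts b + 1 else 0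

lemma kf_le (l : List (Int × Int)) (b : Int) : kf l b ≤ l.length := by
  induction l with
  | nil => simp [kf]
  | cons t ts ih => simp only [kf, List.length_cons]; split <;> omega

lemma drainA_eq (l : List (Int × Int)) (b : Int) : ∀ wt,
    drainA l wt b = (l.drop (kf l b), wt ++ l.take (kf l b)) := by
  induction l with
  | nil => intro wt; simp [drainA, kf]
  | cons t ts ih =>
      intro wt
      by_cases h : t.1 ≤ b
      · simp [drainA, kf, h, ih]
      · simp [drainA, kf, h]

lemma advanceB_eq (nt : List (Int × Int)) (b : Int) : ∀ i,
    advanceB nt i b = i + kf (nt.drop i) b := by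
  intro i
  fun_induction advanceB nt i b with
  | case1 i t h hle ih =>
      obtain ⟨hlt, hget⟩ := List.getElem?_eq_some_iff.mp h
      rw [List.drop_eq_getElem_cons hlt, hget]
      simp only [kf, if_pos hle, ih]
      omega
  | case2 i t h hle =>
      obtain ⟨hlt, hget⟩ := List.getElem?_eq_some_iff.mp h
      rw [List.drop_eq_getElem_cons hlt, hget]
      simp [kf, hle]
  | case3 i h =>
      have hlen : nt.length ≤ i := by
        by_contra hc
        simp [List.getElem?_eq_getElem (by omega : i < nt.length)] at h
      rw [List.drop_eq_nil_of_le hlen]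
      simp [kf]

lemma advanceB_bounds (nt : List (Int × Int)) (b : Int) (i : Nat) (hi : i ≤ nt.length) :
    i ≤ advanceB nt i b ∧ advanceB nt i b ≤ nt.length := by
  rw [advanceB_eq]
  have := kf_le (nt.drop i) b
  simp only [List.length_drop] at this
  omega

lemma boardA_fst (m : Int) : ∀ (wt : List (Int × Int)) (c : Int),
    (boardA wt c m).1 = (wt.take (m - c).toNat).any (fun t => t.2 != 0) := by
  intro wt
  induction wt with
  | nil => intro c; simp only [boardA]; split <;> simp
  | cons crew rest ih =>
      intro c
      by_cases hc : c < m
      · have hk : (m - c).toNat = (m - (c + 1)).toNat + 1 := by omega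
        rw [hk]
        by_cases hp : crew.2 ≠ 0
        · simp [boardA, hc, hp]
        · simp only [ne_eq, not_not] at hp
          simp [boardA, hc, hp, ih]
      · have hk : (m - c).toNat = 0 := by omega
        simp [boardA, hc, hk]

lemma boardA_snd (m : Int) : ∀ (wt : List (Int × Int)) (c : Int),
    (wt.take (m - c).toNat).any (fun t => t.2 != 0) = false →
    boardA wt c m = (false, wt.drop (m - c).toNat) := by
  intro wt
  induction wt with
  | nil => intro c _; simp only [boardA]; split <;> simp
  | cons crew rest ih =>
      intro c hany
      by_cases hc : c < m
      · have hk : (m - c).toNat = (m - (c + 1)).toNat + 1 := by omega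
        rw [hk] at hany ⊢
        simp only [List.take_succ_cons, List.any_cons, Bool.or_eq_false_iff] at hany
        obtain ⟨h1, h2⟩ := hany
        have hp : crew.2 = 0 := by simpa using h1
        simp [boardA, hc, hp, ih _ h2]
      · have hk : (m - c).toNat = 0 := by omega
        simp [boardA, hc, hk]

-- B's algorithm written as a recursion matching A's outer loop, used as the bridge
def specB (nt : List (Int × Int)) (cap : Nat) : List Int → Nat → Nat → Bool
  | [], _, _ => false
  | b :: rest, i, j =>
      ((nt.drop j).take (min (advanceB nt i b) (j + cap) - j)).any (fun t => t.2 != 0)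
        || specB nt cap rest (advanceB nt i b) (min (advanceB nt i b) (j + cap))

lemma tsLoopA_eq_specB (nt : List (Int × Int)) (m : Int) :
    ∀ (bt : List Int) (i j : Nat), j ≤ i → i ≤ nt.length →
    tsLoopA (nt.drop i) ((nt.drop j).take (i - j)) bt m
      = specB nt (max m 0).toNat bt i j := by
  intro bt
  induction bt with
  | nil => intro i j _ _; simp [tsLoopA, specB]
  | cons b rest ih =>
      intro i j hji hin
      obtain ⟨hii', hi'n⟩ := advanceB_bounds nt b i hin
      have hkf : advanceB nt i b = i + kf (nt.drop i) b := advanceB_eq nt b i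
      set cap := (max m 0).toNat with hcap
      set i' := advanceB nt i b with hi'
      set j' := min i' (j + cap) with hj'
      have hdrain : drainA (nt.drop i) ((nt.drop j).take (i - j)) b
          = (nt.drop i', (nt.drop j).take (i' - j)) := by
        rw [drainA_eq, Prod.mk.injEq]
        refine ⟨?_, ?_⟩
        · rw [List.drop_drop]; congr 1; omega
        · have h1 : i' - j = (i - j) + kf (nt.drop i) b := by omega
          rw [h1, List.take_add, List.drop_drop]
          have h2 : j + (i - j) = i := by omega
          rw [h2]
      have hm0 : (m - 0).toNat = cap := by rw [hcap]; omega
      have hbatch : ((nt.drop j).take (i' - j)).take cap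
          = (nt.drop j).take (j' - j) := by
        rw [List.take_take]
        congr 1
        omega
      have hfst : (boardA ((nt.drop j).take (i' - j)) 0 m).1
          = ((nt.drop j).take (j' - j)).any (fun t => t.2 != 0) := by
        rw [boardA_fst, hm0, hbatch]
      have hS : specB nt cap (b :: rest) i j
          = (((nt.drop j).take (j' - j)).any (fun t => t.2 != 0)
              || specB nt cap rest i' j') := by
        simp only [specB]
        rw [← hi', ← hj']
      by_cases hb : ((nt.drop j).take (j' - j)).any (fun t => t.2 != 0) = true
      · rw [hS, hb]
        simp [tsLoopA, hdrain, hfst, hb]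
      · have hb' : ((nt.drop j).take (j' - j)).any (fun t => t.2 != 0) = false :=
          Bool.not_eq_true _ ▸ (by simpa using hb)
        have hsnd : boardA ((nt.drop j).take (i' - j)) 0 m
            = (false, ((nt.drop j).take (i' - j)).drop cap) := by
          rw [boardA_snd m _ 0 (by rw [hm0, hbatch]; exact hb'), hm0]
        have hleft : ((nt.drop j).take (i' - j)).drop cap
            = (nt.drop j').take (i' - j') := by
          rw [List.drop_take, List.drop_drop]
          by_cases hcase : j + cap ≤ i'
          · have h1 : i' - j - cap = i' - j' := by omega
            have h2 : j + cap = j' := by omega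
            rw [h1, h2]
          · have h1 : i' - j - cap = 0 := by omega
            have h2 : i' - j' = 0 := by omega
            rw [h1, h2]; simp
        rw [hS, hb', Bool.false_or]
        simp only [tsLoopA, hdrain, hsnd, Bool.false_eq_true, if_false]
        rw [hleft]
        exact ih i' j' (by omega) hi'n

lemma fold_bounds (nt : List (Int × Int)) (cap : Nat) :
    ∀ (bt : List Int) (i j : Nat), j ≤ i → i ≤ nt.length →
    j ≤ (bt.foldl (stepB nt cap) (i, j)).2 ∧
    (bt.foldl (stepB nt cap) (i, j)).2 ≤ (bt.foldl (stepB nt cap) (i, j)).1 ∧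
    (bt.foldl (stepB nt cap) (i, j)).1 ≤ nt.length := by
  intro bt
  induction bt with
  | nil => intro i j hji hin; exact ⟨le_refl _, hji, hin⟩
  | cons b rest ih =>
      intro i j hji hin
      obtain ⟨h1, h2⟩ := advanceB_bounds nt b i hin
      simp only [List.foldl_cons, stepB]
      have := ih (advanceB nt i b) (min (advanceB nt i b) (j + cap)) (by omega) h2
      exact ⟨by omega, this.2.1, this.2.2⟩

lemma specB_eq_fold (nt : List (Int × Int)) (cap : Nat) :
    ∀ (bt : List Int) (i j : Nat), j ≤ i → i ≤ nt.length →
    specB nt cap bt i j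
      = ((nt.take (bt.foldl (stepB nt cap) (i, j)).2).drop j).any (fun t => t.2 != 0) := by
  intro bt
  induction bt with
  | nil =>
      intro i j hji _
      simp [specB]
  | cons b rest ih =>
      intro i j hji hin
      obtain ⟨h1, h2⟩ := advanceB_bounds nt b i hin
      set i' := advanceB nt i b with hi'
      set j' := min i' (j + cap) with hj'
      have hj'i' : j' ≤ i' := by omega
      have hjj' : j ≤ j' := by omega
      have hf := fold_bounds nt cap rest i' j' hj'i' h2
      set jf := (rest.foldl (stepB nt cap) (i', j')).2 with hjf
      have hstep : ((b :: rest).foldl (stepB nt cap) (i, j)).2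
          = (rest.foldl (stepB nt cap) (i', j')).2 := by
        simp only [List.foldl_cons, stepB]
        rw [← hi', ← hj']
      rw [hstep]
      have hS : specB nt cap (b :: rest) i j
          = (((nt.drop j).take (j' - j)).any (fun t => t.2 != 0)
              || specB nt cap rest i' j') := by
        simp only [specB]
        rw [← hi', ← hj']
      rw [hS, ih i' j' hj'i' h2]
      have hsplit : (nt.take jf).drop j
          = (nt.drop j).take (j' - j) ++ (nt.take jf).drop j' := by
        rw [List.drop_take, List.drop_take]
        have h3 : jf - j = (j' - j) + (jf - j') := by omega
        rw [h3, List.take_add, List.drop_drop]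
        have h4 : j + (j' - j) = j' := by omega
        rw [h4]
      rw [hsplit, List.any_append]

-- ===== VERDICT (by name: the statement is the Claim_ definition above) =====
theorem target_safe_spec : Claim_equal_target_safe := by
  intro nt bt m _
  unfold Spec_target_safe target_safe target_safe_alt
  have h0 : tsLoopA (nt.drop 0) ((nt.drop 0).take (0 - 0)) bt m
      = specB nt (max m 0).toNat bt 0 0 :=
    tsLoopA_eq_specB nt m bt 0 0 (le_refl 0) (Nat.zero_le _)
  simp only [List.drop_zero, Nat.sub_self, List.take_zero] at h0
  rw [h0, specB_eq_fold nt (max m 0).toNat bt 0 0 (le_refl 0) (Nat.zero_le _), List.drop_zero]
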